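-- pv_equiv track=rewrite | github.com/bxgda/slot-rtp-calculator | games/book_of_ra/mechanics.py | _count_consecutive
-- ===== SOURCE A (Python) =====
-- def _count_consecutive(line):
--     # counts consecutive matching symbols from left to right.
--
--     if not line:
--         return (None, 0)
--
--     symbol = line[0]
--     count = 1
--
--     for i in range(1, len(line)):
--         if line[i] == symbol:
--             count += 1
--         else:
--             break
--
--     return (symbol, count)
-- ===== SOURCE B (Python) =====
-- def _count_consecutive(line):
--     # Staged formulation: the leading-run length is the position of the first
--     # element that differs from line[0] (or len(line) if every element matches).
--     if not line:
--         return (None, 0)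
--     symbol = line[0]
--     mismatch_positions = [i for i, v in enumerate(line) if v != symbol]
--     count = mismatch_positions[0] if mismatch_positions else len(line)
--     return (symbol, count)
-- ===== Notes on version B (the rewrite author's own statement) =====
-- stated objective: alternative
-- what changed: Instead of a counter loop that breaks at the first mismatch, B computes the full list of mismatch positions via enumerate over the whole line and takes the first one (or len(line)) as the run length: a staged whole-list formulation with no counter and no early exit.
import Mathlib
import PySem

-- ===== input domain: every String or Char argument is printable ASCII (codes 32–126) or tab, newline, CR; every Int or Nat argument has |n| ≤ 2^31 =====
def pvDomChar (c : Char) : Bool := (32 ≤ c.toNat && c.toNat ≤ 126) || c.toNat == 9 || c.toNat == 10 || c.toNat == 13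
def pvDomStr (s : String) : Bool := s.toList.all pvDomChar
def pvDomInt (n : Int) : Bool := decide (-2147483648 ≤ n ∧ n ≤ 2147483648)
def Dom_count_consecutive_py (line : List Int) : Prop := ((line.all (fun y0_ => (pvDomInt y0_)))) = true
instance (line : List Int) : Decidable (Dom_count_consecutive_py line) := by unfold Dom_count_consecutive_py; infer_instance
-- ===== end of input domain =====

-- B replaces A's break-on-mismatch counter loop by a staged whole-list formulation:
-- collect all mismatch positions with enumerate, the run length is the first one (or len); objective: alternative.


-- ===== PORT A =====
-- the for-loop over range(1, len(line)) with break, as structural recursion over the tail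
def countLoopA (symbol : Int) : List Int → Int → Int
  | [], count => count
  | x :: rest, count => if x = symbol then countLoopA symbol rest (count + 1) else count

def count_consecutive_py (line : List Int) : Option Int × Int :=
  match line with
  | [] => (none, 0)
  | s :: rest => (some s, countLoopA s rest 1)

-- ===== PORT B =====
-- [i for i, v in enumerate(line) if v != symbol]; count = mismatch_positions[0] if any else len(line)
def count_consecutive_py_alt (line : List Int) : Option Int × Int :=
  match line with
  | [] => (none, 0)
  | symbol :: _ =>
    let mismatch_positions :=
      ((PySem.List.enumerate line).filter (fun p => p.2 ≠ symbol)).map (fun p => p.1)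
    match mismatch_positions with
    | [] => (some symbol, Int.ofNat line.length)
    | i :: _ => (some symbol, i)

-- ===== PRECONDITION & SPEC =====
def Spec_count_consecutive_py (line : List Int) (out : Option Int × Int) : Prop := out = count_consecutive_py_alt line
instance (line : List Int) (out : Option Int × Int) : Decidable (Spec_count_consecutive_py line out) := by unfold Spec_count_consecutive_py; infer_instance

-- ===== CLAIM (what is proved, stated in full; the proofs are below) =====
def Claim_equal_count_consecutive_py : Prop := ∀ (line : List Int), Dom_count_consecutive_py line → Spec_count_consecutive_py line (count_consecutive_py line)

-- ===== LEMMAS AND PROOFS =====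
-- A's loop over the tail, started at count c with offset s for the enumerate indices,
-- equals the first mismatch position (or c + length if none).
theorem countLoopA_eq_first_mismatch (sym : Int) (l : List Int) (c s : Int) :
    countLoopA sym l c =
      match ((PySem.List.enumerate l s).filter (fun p => p.2 ≠ sym)).map (fun p => p.1) with
      | [] => c + Int.ofNat l.length
      | i :: _ => c + (i - s) := by
  induction l generalizing c s with
  | nil => simp [countLoopA, PySem.List.enumerate]
  | cons x rest ih =>
    by_cases h : x = sym
    · have := ih (c + 1) (s + 1)
      simp [countLoopA, h, PySem.List.enumerate_cons, this]
      cases hm : ((PySem.List.enumerate rest (s + 1)).filter (fun p => !decide (p.2 = sym))).map (fun p => p.1) with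
      | nil => simp; ring
      | cons i t => simp; ring
    · simp [countLoopA, h, PySem.List.enumerate_cons]

-- ===== VERDICT (by name: the statement is the Claim_ definition above) =====
theorem count_consecutive_py_spec : Claim_equal_count_consecutive_py := by
  intro line _
  unfold Spec_count_consecutive_py count_consecutive_py count_consecutive_py_alt
  cases line with
  | nil => rfl
  | cons x rest =>
    have key := countLoopA_eq_first_mismatch x rest 1 1
    simp [PySem.List.enumerate_cons, key]
    cases hm : ((PySem.List.enumerate rest 1).filter (fun p => !decide (p.2 = x))).map (fun p => p.1) with
    | nil => simp; ring
    | cons i t => simp
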